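-- pv_equiv track=rewrite | github.com/avinashreddy2122/CP | 02-carrylessadd-Python/carrylessadd.py | fun_carrylessadd
-- ===== SOURCE A (Python) =====
-- def fun_carrylessadd(x, y):
-- 	position=0
-- 	value=0
-- 	sum=0
-- 	while(True):
-- 		sum=(x%10)+(y%10)
-- 		if(sum>9):
-- 			sum=sum%10
-- 		value=value+sum*(10**position)
-- 		position+=1
-- 		x=x//10
-- 		y=y//10
-- 		if(x==0 and y==0):
-- 			break
-- 	return value
-- ===== SOURCE B (Python) =====
-- def fun_carrylessadd(x, y):
--     # Recursive digit-wise no-carry addition: lowest digit is (x+y)%10,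
--     # higher digits come from the recursive call on x//10, y//10.
--     if x < 10 and y < 10:
--         return (x + y) % 10
--     return 10 * fun_carrylessadd(x // 10, y // 10) + (x + y) % 10
-- ===== Notes on version B (the rewrite author's own statement) =====
-- stated objective: simpler
-- what changed: Replaces the while-loop with live position/value accumulators and a conditional mod by a direct recursion on x//10,y//10 whose digit is the single expression (x+y)%10; Pre_ excludes negative inputs, on which A loops forever.
import Mathlib
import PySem

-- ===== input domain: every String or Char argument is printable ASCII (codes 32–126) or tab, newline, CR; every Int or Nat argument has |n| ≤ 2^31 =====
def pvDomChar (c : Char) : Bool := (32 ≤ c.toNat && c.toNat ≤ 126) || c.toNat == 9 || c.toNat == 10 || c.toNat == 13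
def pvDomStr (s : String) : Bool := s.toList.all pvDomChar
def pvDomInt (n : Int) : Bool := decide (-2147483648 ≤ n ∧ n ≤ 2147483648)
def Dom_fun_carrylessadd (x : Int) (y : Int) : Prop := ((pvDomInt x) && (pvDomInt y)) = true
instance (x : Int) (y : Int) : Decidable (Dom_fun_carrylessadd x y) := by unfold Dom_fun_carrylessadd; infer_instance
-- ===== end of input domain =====

-- B replaces A's while-loop with live position/value accumulators by a direct recursion
-- on x//10, y//10 whose digit is the single expression (x+y)%10 (objective: simpler).

-- ===== PORT A =====
-- A's while-True loop, transcribed with a fuel parameter (the loop does not terminate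
-- for negative inputs, which Pre_ excludes; the fuel is always sufficient on Pre_).
def carrylessA_go : Nat → Int → Int → Nat → Int → Int
  | 0, _, _, _, value => value
  | fuel+1, x, y, position, value =>
      let sum := PySem.Int.mod x 10 + PySem.Int.mod y 10
      let sum := if sum > 9 then PySem.Int.mod sum 10 else sum
      let value := value + sum * (10:Int)^position
      let x' := PySem.Int.floordiv x 10
      let y' := PySem.Int.floordiv y 10
      if x' = 0 ∧ y' = 0 then value else carrylessA_go fuel x' y' (position+1) value

def fun_carrylessadd (x : Int) (y : Int) : Int :=
  carrylessA_go (x.natAbs + y.natAbs + 1) x y 0 0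

-- ===== PORT B =====
-- B's recursion on x//10, y//10, transcribed with a fuel parameter for totality
-- (the fuel is always sufficient: the recursion depth is at most x.natAbs + y.natAbs).
def carrylessB_go : Nat → Int → Int → Int
  | 0, x, y => PySem.Int.mod (x + y) 10
  | n+1, x, y =>
      if x < 10 ∧ y < 10 then PySem.Int.mod (x + y) 10
      else 10 * carrylessB_go n (PySem.Int.floordiv x 10) (PySem.Int.floordiv y 10)
            + PySem.Int.mod (x + y) 10

def fun_carrylessadd_alt (x : Int) (y : Int) : Int :=
  carrylessB_go (x.natAbs + y.natAbs) x y

-- ===== PRECONDITION & SPEC =====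
-- Pre_ excludes negative x or y, on which A's while-loop never terminates (x//10 stalls at -1).
def Pre_fun_carrylessadd (x : Int) (y : Int) : Prop := 0 ≤ x ∧ 0 ≤ y
instance (x : Int) (y : Int) : Decidable (Pre_fun_carrylessadd x y) := by
  unfold Pre_fun_carrylessadd; infer_instance
def pvWitness_fun_carrylessadd : Int × Int := (95, 17)

def Spec_fun_carrylessadd (x : Int) (y : Int) (out : Int) : Prop := out = fun_carrylessadd_alt x y
instance (x : Int) (y : Int) (out : Int) : Decidable (Spec_fun_carrylessadd x y out) := by
  unfold Spec_fun_carrylessadd; infer_instance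

-- ===== CLAIM (what is proved, stated in full; the proofs are below) =====
def Claim_equal_fun_carrylessadd : Prop := ∀ (x : Int) (y : Int), Dom_fun_carrylessadd x y → Pre_fun_carrylessadd x y → Spec_fun_carrylessadd x y (fun_carrylessadd x y)

-- ===== LEMMAS AND PROOFS =====

-- turn PySem floor division / modulus by 10 into Lean's ediv/emod (divisor is positive)
theorem fdiv10 (x : Int) : PySem.Int.floordiv x 10 = x / 10 :=
  PySem.Int.floordiv_eq_ediv_of_pos (by norm_num)

theorem fmod10 (x : Int) : PySem.Int.mod x 10 = x % 10 :=
  PySem.Int.mod_eq_emod_of_pos (by norm_num)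

-- in the base case the fuel is irrelevant
theorem goB_base (n : Nat) (x y : Int) (hx : x < 10) (hy : y < 10) :
    carrylessB_go n x y = (x + y) % 10 := by
  cases n with
  | zero => rw [carrylessB_go, fmod10]
  | succ m => rw [carrylessB_go, if_pos ⟨hx, hy⟩, fmod10]

-- any sufficient fuel computes the same value
theorem goB_congr : ∀ (n m : Nat) (x y : Int), 0 ≤ x → 0 ≤ y →
    x.natAbs + y.natAbs ≤ n → x.natAbs + y.natAbs ≤ m →
    carrylessB_go n x y = carrylessB_go m x y := by
  intro n
  induction n with
  | zero =>
      intro m x y hx hy hn _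
      have hx0 : x = 0 := by omega
      have hy0 : y = 0 := by omega
      subst hx0; subst hy0
      rw [goB_base 0 0 0 (by norm_num) (by norm_num),
          goB_base m 0 0 (by norm_num) (by norm_num)]
  | succ k ih =>
      intro m x y hx hy hn hm
      by_cases hs : x < 10 ∧ y < 10
      · rw [goB_base _ x y hs.1 hs.2, goB_base m x y hs.1 hs.2]
      · have hm' : ∃ l, m = l + 1 := by
          refine ⟨m - 1, ?_⟩
          omega
        obtain ⟨l, rfl⟩ := hm'
        rw [carrylessB_go, carrylessB_go, if_neg hs, if_neg hs]
        rw [fdiv10, fdiv10]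
        rw [ih l (x / 10) (y / 10) (by omega) (by omega) (by omega) (by omega)]

-- the loop-body digit equals (x+y)%10
theorem digit_eq (x y : Int) :
    (if PySem.Int.mod x 10 + PySem.Int.mod y 10 > 9
       then PySem.Int.mod (PySem.Int.mod x 10 + PySem.Int.mod y 10) 10
       else PySem.Int.mod x 10 + PySem.Int.mod y 10) = (x + y) % 10 := by
  rw [fmod10, fmod10]
  split_ifs with h
  · rw [fmod10]; omega
  · omega

-- B's value decomposed one digit at a time, in the non-base case
theorem alt_step (x y : Int) (hx : 0 ≤ x) (hy : 0 ≤ y) (h : ¬ (x < 10 ∧ y < 10)) :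
    fun_carrylessadd_alt x y =
      10 * fun_carrylessadd_alt (x / 10) (y / 10) + (x + y) % 10 := by
  unfold fun_carrylessadd_alt
  have hpos : ∃ l, x.natAbs + y.natAbs = l + 1 := ⟨x.natAbs + y.natAbs - 1, by omega⟩
  obtain ⟨l, hl⟩ := hpos
  rw [hl, carrylessB_go, if_neg h, fdiv10, fdiv10]
  rw [goB_congr l ((x / 10).natAbs + (y / 10).natAbs) (x / 10) (y / 10)
        (by omega) (by omega) (by omega) le_rfl, fmod10]

-- A's loop invariant: with sufficient fuel it adds B's value at the current weight
theorem goA_eq : ∀ (n : Nat) (x y : Int), 0 ≤ x → 0 ≤ y → x.natAbs + y.natAbs ≤ n →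
    ∀ (pos : Nat) (value : Int),
      carrylessA_go (n + 1) x y pos value = value + fun_carrylessadd_alt x y * 10 ^ pos := by
  intro n
  induction n with
  | zero =>
      intro x y hx hy hn pos value
      have hx0 : x = 0 := by omega
      have hy0 : y = 0 := by omega
      subst hx0; subst hy0
      simp [carrylessA_go, fun_carrylessadd_alt, carrylessB_go, PySem.Int.mod,
        PySem.Int.floordiv]
  | succ m ih =>
      intro x y hx hy hn pos value
      show carrylessA_go (m + 1 + 1) x y pos value = _
      rw [carrylessA_go]
      simp only [digit_eq, fdiv10]
      by_cases hb : x / 10 = 0 ∧ y / 10 = 0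
      · rw [if_pos hb]
        have hsmall : x < 10 ∧ y < 10 := by omega
        unfold fun_carrylessadd_alt
        rw [goB_base _ x y hsmall.1 hsmall.2]
      · rw [if_neg hb]
        rw [ih (x / 10) (y / 10) (by omega) (by omega) (by omega) (pos + 1)
              (value + (x + y) % 10 * 10 ^ pos)]
        rw [alt_step x y hx hy (by omega)]
        ring

-- ===== VERDICT (by name: the statement is the Claim_ definition above) =====
theorem fun_carrylessadd_spec : Claim_equal_fun_carrylessadd := by
  intro x y _ hpre
  unfold Spec_fun_carrylessadd fun_carrylessadd
  rw [goA_eq (x.natAbs + y.natAbs) x y hpre.1 hpre.2 le_rfl 0 0]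
  simp
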